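-- pv_equiv track=rewrite | github.com/IrisYanfGuo/bioinformatics | sec_str/pre_process.py | fSR2
-- ===== SOURCE A (Python) =====
-- def fSR2(list_2_2):
--     result = {}
--     fS = {}
--     fR = {}
--     for i in list_2_2:
--         # calculate fSR
--         if i[1] in result.keys():
--             if i[0] in result[i[1]].keys():
--                 result[i[1]][i[0]] += 1
--             else:
--
--                 result[i[1]][i[0]] = 1
--         else:
--             temp = {}
--             temp[i[0]] = 1
--             result[i[1]] = temp
--         # calcuate fS
--         if i[1] in fS.keys():
--             fS[i[1]] += 1
--         else:
--             fS[i[1]] = 1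
--         # calculate fR
--         if i[0] in fR.keys():
--             fR[i[0]] += 1
--         else:
--             fR[i[0]] = 1
--
--     return result, fS, fR
-- ===== SOURCE B (Python) =====
-- def fSR2(list_2_2):
--     # Build only the joint table, then derive the fS marginal from it;
--     # fR is counted in its own simple pass.
--     result = {}
--     for r, s in list_2_2:
--         inner = result.get(s, {})
--         inner[r] = inner.get(r, 0) + 1
--         result[s] = inner
--     fS = {s: sum(inner.values()) for s, inner in result.items()}
--     fR = {}
--     for r, _ in list_2_2:
--         fR[r] = fR.get(r, 0) + 1
--     return result, fS, fR
-- ===== Notes on version B (the rewrite author's own statement) =====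
-- stated objective: alternative
-- what changed: A maintains the joint table and both marginals simultaneously in one combined loop; B builds only the joint table, derives the fS marginal from it by summing each inner dict's values, and counts fR in its own separate pass.
import Mathlib
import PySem

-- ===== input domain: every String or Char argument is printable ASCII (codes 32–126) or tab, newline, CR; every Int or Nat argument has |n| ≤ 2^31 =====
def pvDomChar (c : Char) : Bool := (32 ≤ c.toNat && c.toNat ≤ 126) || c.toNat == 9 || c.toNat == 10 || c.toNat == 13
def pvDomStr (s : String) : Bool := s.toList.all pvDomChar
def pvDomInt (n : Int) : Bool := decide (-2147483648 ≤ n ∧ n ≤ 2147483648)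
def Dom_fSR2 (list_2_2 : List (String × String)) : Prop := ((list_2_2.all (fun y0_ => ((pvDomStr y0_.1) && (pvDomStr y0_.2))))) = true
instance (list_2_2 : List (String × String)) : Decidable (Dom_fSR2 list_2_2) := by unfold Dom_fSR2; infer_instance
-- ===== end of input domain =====

-- B builds only the joint table, derives the fS marginal from it by summing inner values,
-- and counts fR in its own pass; A maintains all three dicts in one combined loop. Objective: alternative decomposition.


-- ===== PORT A =====
-- the body of A's single for-loop over (result, fS, fR)
def aStep (st : PySem.Dict String (PySem.Dict String Int) × PySem.Dict String Int × PySem.Dict String Int)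
    (i : String × String) :
    PySem.Dict String (PySem.Dict String Int) × PySem.Dict String Int × PySem.Dict String Int :=
  let result := st.1
  let fS := st.2.1
  let fR := st.2.2
  -- calculate fSR
  let result :=
    if result.contains i.2 then
      let inner := result.getD i.2 PySem.Dict.empty
      if inner.contains i.1 then
        result.insert i.2 (inner.insert i.1 (inner.getD i.1 0 + 1))
      else
        result.insert i.2 (inner.insert i.1 1)
    else
      let temp := (PySem.Dict.empty : PySem.Dict String Int).insert i.1 1
      result.insert i.2 temp
  -- calculate fS
  let fS := if fS.contains i.2 then fS.insert i.2 (fS.getD i.2 0 + 1) else fS.insert i.2 1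
  -- calculate fR
  let fR := if fR.contains i.1 then fR.insert i.1 (fR.getD i.1 0 + 1) else fR.insert i.1 1
  (result, fS, fR)

def fSR2 (list_2_2 : List (String × String)) : (List (String × List (String × Int))) × (List (String × Int)) × (List (String × Int)) :=
  let st := list_2_2.foldl aStep (PySem.Dict.empty, PySem.Dict.empty, PySem.Dict.empty)
  (st.1.items.map (fun p => (p.1, p.2.items)), st.2.1.items, st.2.2.items)

-- ===== PORT B =====
-- inner = result.get(s, {}); inner[r] = inner.get(r, 0) + 1; result[s] = inner
def bResStep (d : PySem.Dict String (PySem.Dict String Int)) (i : String × String) :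
    PySem.Dict String (PySem.Dict String Int) :=
  let inner := d.getD i.2 PySem.Dict.empty
  d.insert i.2 (inner.insert i.1 (inner.getD i.1 0 + 1))

def fSR2_alt (list_2_2 : List (String × String)) : (List (String × List (String × Int))) × (List (String × Int)) × (List (String × Int)) :=
  let result := list_2_2.foldl bResStep PySem.Dict.empty
  -- fS derived from the joint table: {s: sum(inner.values()) for s, inner in result.items()}
  let fS := result.items.map (fun p => (p.1, p.2.values.sum))
  -- fR counted in its own pass: fR[r] = fR.get(r, 0) + 1
  let fR := list_2_2.foldl (fun d i => d.insert i.1 (d.getD i.1 0 + 1)) (PySem.Dict.empty : PySem.Dict String Int)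
  (result.items.map (fun p => (p.1, p.2.items)), fS, fR.items)

-- ===== PRECONDITION & SPEC =====
def Spec_fSR2 (list_2_2 : List (String × String)) (out : (List (String × List (String × Int))) × (List (String × Int)) × (List (String × Int))) : Prop := out = fSR2_alt list_2_2
instance (list_2_2 : List (String × String)) (out : (List (String × List (String × Int))) × (List (String × Int)) × (List (String × Int))) : Decidable (Spec_fSR2 list_2_2 out) := by unfold Spec_fSR2; infer_instance

-- ===== CLAIM (what is proved, stated in full; the proofs are below) =====
def Claim_equal_fSR2 : Prop := ∀ (list_2_2 : List (String × String)), Dom_fSR2 list_2_2 → Spec_fSR2 list_2_2 (fSR2 list_2_2)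

-- ===== LEMMAS AND PROOFS =====

-- A's component steps, for splitting the combined fold
def aRes (d : PySem.Dict String (PySem.Dict String Int)) (i : String × String) :
    PySem.Dict String (PySem.Dict String Int) :=
  if d.contains i.2 then
    let inner := d.getD i.2 PySem.Dict.empty
    if inner.contains i.1 then d.insert i.2 (inner.insert i.1 (inner.getD i.1 0 + 1))
    else d.insert i.2 (inner.insert i.1 1)
  else d.insert i.2 ((PySem.Dict.empty : PySem.Dict String Int).insert i.1 1)

def aBump (d : PySem.Dict String Int) (k : String) : PySem.Dict String Int :=
  if d.contains k then d.insert k (d.getD k 0 + 1) else d.insert k 1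

lemma aStep_eq (st : PySem.Dict String (PySem.Dict String Int) × PySem.Dict String Int × PySem.Dict String Int)
    (i : String × String) :
    aStep st i = (aRes st.1 i, aBump st.2.1 i.2, aBump st.2.2 i.1) := rfl

-- the combined fold is three independent folds
lemma foldl_split (l : List (String × String)) :
    ∀ (res : PySem.Dict String (PySem.Dict String Int)) (fs fr : PySem.Dict String Int),
      l.foldl aStep (res, fs, fr)
        = (l.foldl aRes res, l.foldl (fun d i => aBump d i.2) fs, l.foldl (fun d i => aBump d i.1) fr) := by
  induction l with
  | nil => intro res fs fr; rfl
  | cons i t ih =>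
      intro res fs fr
      simp only [List.foldl_cons, aStep_eq]
      exact ih _ _ _

-- "if k in d: d[k] += 1 else: d[k] = 1" is "d[k] = d.get(k, 0) + 1"
lemma aBump_eq (d : PySem.Dict String Int) (k : String) :
    aBump d k = d.insert k (d.getD k 0 + 1) := by
  unfold aBump
  by_cases h : d.contains k = true
  · simp [h]
  · simp only [Bool.not_eq_true] at h
    rw [if_neg (by simp [h]), PySem.Dict.getD_of_not_contains d 0 h]
    norm_num

-- A's result step is B's result step
lemma aRes_eq (d : PySem.Dict String (PySem.Dict String Int)) (i : String × String) :
    aRes d i = bResStep d i := by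
  unfold aRes bResStep
  by_cases h : d.contains i.2 = true
  · simp only [h, if_true]
    by_cases h2 : (d.getD i.2 PySem.Dict.empty).contains i.1 = true
    · simp [h2]
    · simp only [Bool.not_eq_true] at h2
      rw [if_neg (by simp [h2]), PySem.Dict.getD_of_not_contains _ 0 h2]
      norm_num
  · simp only [Bool.not_eq_true] at h
    rw [if_neg (by simp [h]), PySem.Dict.getD_of_not_contains d PySem.Dict.empty h]
    simp [PySem.Dict.getD_empty]

-- incrementing one entry of a dict raises the sum of its values by 1
lemma sum_map_ite_bump {ks : List String} (r : String) (f : String → Int)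
    (hnd : ks.Nodup) (hmem : r ∈ ks) :
    (ks.map (fun k => if k = r then f r + 1 else f k)).sum = (ks.map f).sum + 1 := by
  induction ks with
  | nil => cases hmem
  | cons a t ih =>
      rcases List.nodup_cons.mp hnd with ⟨hna, hndt⟩
      simp only [List.map_cons, List.sum_cons]
      by_cases ha : a = r
      · subst ha
        rw [if_pos rfl]
        have : ∀ k ∈ t, (if k = a then f a + 1 else f k) = f k := by
          intro k hk
          rw [if_neg (by rintro rfl; exact hna hk)]
        rw [List.map_congr_left this]; ring
      · have hm : r ∈ t := by
          rcases List.mem_cons.mp hmem with h | h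
          · exact absurd h.symm ha
          · exact h
        rw [if_neg ha, ih hndt hm]; ring

lemma sum_bump (inner : PySem.Dict String Int) (r : String) (hnd : inner.keys.Nodup) :
    (inner.insert r (inner.getD r 0 + 1)).values.sum = inner.values.sum + 1 := by
  by_cases h : inner.contains r = true
  · have hnd' : (inner.insert r (inner.getD r 0 + 1)).keys.Nodup := PySem.Dict.nodup_keys_insert _ _ _ hnd
    rw [PySem.Dict.values_eq_map_keys _ hnd' 0, PySem.Dict.values_eq_map_keys _ hnd 0,
        PySem.Dict.keys_insert_of_contains _ _ h]
    have : ∀ k ∈ inner.keys, (inner.insert r (inner.getD r 0 + 1)).getD k 0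
        = if k = r then inner.getD r 0 + 1 else inner.getD k 0 := by
      intro k _; rw [PySem.Dict.getD_insert]
    rw [List.map_congr_left this]
    exact sum_map_ite_bump r (fun k => inner.getD k 0) hnd ((PySem.Dict.contains_iff_mem_keys _ _).mp h)
  · simp only [Bool.not_eq_true] at h
    rw [PySem.Dict.getD_of_not_contains _ 0 h]
    simp [PySem.Dict.values, PySem.Dict.items_insert_of_not_contains _ _ h]

-- every inner dict of the table built by B's loop has nodup keys
lemma inner_nodup_step (d : PySem.Dict String (PySem.Dict String Int)) (i : String × String)
    (hd : ∀ v ∈ d.values, v.keys.Nodup) : ∀ v ∈ (bResStep d i).values, v.keys.Nodup := by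
  intro v hv
  unfold bResStep at hv
  rcases PySem.Dict.mem_values_insert _ _ _ _ hv with h | h
  · subst h
    apply PySem.Dict.nodup_keys_insert
    rw [PySem.Dict.getD_eq_get?_getD]
    cases hg : d.get? i.2 with
    | none => exact PySem.Dict.nodup_keys_empty
    | some w =>
        have : w ∈ d.values := List.mem_map_of_mem (PySem.Dict.mem_items_of_get?_eq_some d hg)
        exact hd w this
  · exact hd v h

-- sum of inner values of B's table = count of the outer key among second components
lemma sum_getD (l : List (String × String)) :
    ∀ (d : PySem.Dict String (PySem.Dict String Int)) (s : String),
      (∀ v ∈ d.values, v.keys.Nodup) →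
      ((l.foldl bResStep d).getD s PySem.Dict.empty).values.sum
        = (d.getD s PySem.Dict.empty).values.sum + ((l.map Prod.snd).count s : Int) := by
  induction l with
  | nil => intro d s _; simp
  | cons i t ih =>
      intro d s hd
      simp only [List.foldl_cons, List.map_cons]
      rw [ih (bResStep d i) s (inner_nodup_step d i hd)]
      have hin : (d.getD i.2 PySem.Dict.empty).keys.Nodup := by
        rw [PySem.Dict.getD_eq_get?_getD]
        cases hg : d.get? i.2 with
        | none => exact PySem.Dict.nodup_keys_empty
        | some w => exact hd w (List.mem_map_of_mem (PySem.Dict.mem_items_of_get?_eq_some d hg))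
      unfold bResStep
      rw [PySem.Dict.getD_insert]
      by_cases hs : s = i.2
      · subst hs
        rw [if_pos rfl, sum_bump _ _ hin, List.count_cons_self]
        push_cast; ring
      · rw [if_neg hs, List.count_cons_of_ne (by simpa using (Ne.symm hs))]

-- the derived fS equals the counter of the second components, item for item
lemma fS_derived (l : List (String × String)) :
    ((l.foldl bResStep PySem.Dict.empty).items.map (fun p => (p.1, p.2.values.sum)))
      = (PySem.Dict.counter (l.map Prod.snd)).items := by
  have hstep : ∀ (d : PySem.Dict String (PySem.Dict String Int)) (i : String × String),
      bResStep d i = d.insert i.2 ((fun d i => (d.getD i.2 PySem.Dict.empty).insert i.1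
        ((d.getD i.2 PySem.Dict.empty).getD i.1 0 + 1)) d i) := fun d i => rfl
  have hkeyform : l.foldl bResStep PySem.Dict.empty
      = l.foldl (fun d i => d.insert (Prod.snd i) ((fun d i => (d.getD i.2 PySem.Dict.empty).insert i.1
        ((d.getD i.2 PySem.Dict.empty).getD i.1 0 + 1)) d i)) PySem.Dict.empty :=
    List.foldl_ext _ _ _ (fun d i _ => hstep d i)
  have hnd : (l.foldl bResStep PySem.Dict.empty).keys.Nodup := by
    rw [hkeyform]
    exact PySem.Dict.nodup_keys_foldl_insert_key l Prod.snd _ _ PySem.Dict.nodup_keys_empty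
  have hkeys : (l.foldl bResStep PySem.Dict.empty).keys = PySem.Set.ofList (l.map Prod.snd) := by
    rw [hkeyform, PySem.Dict.keys_foldl_insert_key]
    rfl
  rw [PySem.Dict.items_eq_map_keys _ hnd PySem.Dict.empty, PySem.Dict.items_counter, List.map_map, hkeys]
  apply List.map_congr_left
  intro k _
  simp only [Function.comp]
  congr 1
  have h0 : ((PySem.Dict.empty : PySem.Dict String (PySem.Dict String Int)).getD k
      PySem.Dict.empty).values.sum = 0 := by
    rw [PySem.Dict.getD_empty]; rfl
  rw [sum_getD l PySem.Dict.empty k (by simp [PySem.Dict.values, PySem.Dict.empty]), h0, zero_add]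

-- ===== VERDICT (by name: the statement is the Claim_ definition above) =====
theorem fSR2_spec : Claim_equal_fSR2 := by
  intro l _
  show fSR2 l = fSR2_alt l
  unfold fSR2 fSR2_alt
  rw [foldl_split]
  have hres : l.foldl aRes PySem.Dict.empty = l.foldl bResStep PySem.Dict.empty :=
    List.foldl_ext _ _ _ (fun d i _ => aRes_eq d i)
  have hfr : l.foldl (fun d i => aBump d i.1) PySem.Dict.empty
      = l.foldl (fun d i => d.insert i.1 (d.getD i.1 0 + 1)) PySem.Dict.empty :=
    List.foldl_ext _ _ _ (fun d i _ => aBump_eq d i.1)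
  have hfs : (l.foldl (fun d i => aBump d i.2) PySem.Dict.empty).items
      = ((l.foldl bResStep PySem.Dict.empty).items.map (fun p => (p.1, p.2.values.sum))) := by
    have h1 : l.foldl (fun d i => aBump d i.2) PySem.Dict.empty
        = l.foldl (fun d i => d.insert i.2 (d.getD i.2 0 + 1)) PySem.Dict.empty :=
      List.foldl_ext _ _ _ (fun d i _ => aBump_eq d i.2)
    rw [h1, fS_derived]
    rw [← PySem.Dict.foldl_insert_getD_add_one_eq_counter (l.map Prod.snd), List.foldl_map]
  simp only [hres, hfr, hfs]
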